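-- pv_equiv track=rewrite | github.com/zhangyu345293721/leetcode | src/leetcodepython/math/sum_two_integers_371.py | get_sum2
-- ===== SOURCE A (Python) =====
-- def get_sum2(a: int, b: int) -> int:
--     '''
--         计算两个数的和
--     Args:
--         a: 数字a
--         b: 数字b
--     Returns:
--         总和
--     '''
--     while b != 0:
--         if b > 0:
--             b -= 1
--             a += 1
--         else:
--             b += 1
--             a -= 1
--     return a
-- ===== SOURCE B (Python) =====
-- def get_sum2(a: int, b: int) -> int:
--     return a + b
-- ===== Notes on version B (the rewrite author's own statement) =====
-- stated objective: faster
-- what changed: Replaced the unit-step increment/decrement loop (|b| iterations) with the direct closed-form addition a + b.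
import Mathlib
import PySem

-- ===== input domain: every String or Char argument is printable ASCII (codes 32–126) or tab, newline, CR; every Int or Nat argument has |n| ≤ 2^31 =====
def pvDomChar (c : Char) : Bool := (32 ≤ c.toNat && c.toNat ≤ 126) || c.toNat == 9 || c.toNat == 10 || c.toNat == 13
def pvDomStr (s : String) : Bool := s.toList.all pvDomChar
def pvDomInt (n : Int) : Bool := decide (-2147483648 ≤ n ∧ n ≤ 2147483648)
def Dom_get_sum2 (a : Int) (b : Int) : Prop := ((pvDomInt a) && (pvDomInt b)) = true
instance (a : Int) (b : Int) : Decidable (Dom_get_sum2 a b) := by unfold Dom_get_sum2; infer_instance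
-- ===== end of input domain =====

-- B replaces A's unit-step loop (|b| iterations) with the closed-form addition a + b (faster).

-- ===== PORT A =====
-- literal transliteration of A's while loop: step b toward 0 by one, moving a the other way.
-- The loop runs exactly |b| times, so |b| is used as a structural fuel (no step is ever skipped).
def get_sum2_loop : Nat → Int → Int → Int
  | 0, a, _ => a
  | n + 1, a, b =>
    if b = 0 then a
    else if b > 0 then get_sum2_loop n (a + 1) (b - 1)
    else get_sum2_loop n (a - 1) (b + 1)

def get_sum2 (a : Int) (b : Int) : Int := get_sum2_loop b.natAbs a b

-- ===== PORT B =====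
def get_sum2_alt (a : Int) (b : Int) : Int := a + b

-- ===== PRECONDITION & SPEC =====
def Spec_get_sum2 (a : Int) (b : Int) (out : Int) : Prop := out = get_sum2_alt a b
instance (a : Int) (b : Int) (out : Int) : Decidable (Spec_get_sum2 a b out) := by unfold Spec_get_sum2; infer_instance

-- ===== CLAIM (what is proved, stated in full; the proofs are below) =====
def Claim_equal_get_sum2 : Prop := ∀ (a : Int) (b : Int), Dom_get_sum2 a b → Spec_get_sum2 a b (get_sum2 a b)

-- ===== LEMMAS AND PROOFS =====
theorem get_sum2_loop_eq : ∀ (n : Nat) (a b : Int), b.natAbs ≤ n → get_sum2_loop n a b = a + b := by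
  intro n
  induction n with
  | zero =>
    intro a b hn
    have hb : b = 0 := by omega
    simp [get_sum2_loop, hb]
  | succ n ih =>
    intro a b hn
    rw [get_sum2_loop]
    split_ifs with h0 hp
    · omega
    · rw [ih (a + 1) (b - 1) (by omega)]; omega
    · rw [ih (a - 1) (b + 1) (by omega)]; omega

-- ===== VERDICT (by name: the statement is the Claim_ definition above) =====
theorem get_sum2_spec : Claim_equal_get_sum2 := by
  intro a b _
  unfold Spec_get_sum2 get_sum2 get_sum2_alt
  exact get_sum2_loop_eq b.natAbs a b le_rfl
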